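-- pv_equiv track=rewrite | github.com/yattom/yomoyama | trans_server/text.py | split_into_blocks
-- ===== SOURCE A (Python) =====
-- def split_into_blocks(data, lines):
--     blocks = []
--     delimiter = True
--     for i, (head, tail) in enumerate(lines):
--         l = data[head:tail].strip()
--         if len(l) == 0:
--             delimiter = True
--         else:
--             if delimiter:
--                 blocks.append([i, i])
--                 delimiter = False
--             else:
--                 blocks[-1][1] = i
--     return blocks
-- ===== SOURCE B (Python) =====
-- def split_into_blocks(data, lines):
--     def nonblank(p):
--         return len(data[p[0]:p[1]].strip()) != 0
--     blocks = []
--     i, n = 0, len(lines)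
--     while i < n:
--         if nonblank(lines[i]):
--             j = i + 1
--             while j < n and nonblank(lines[j]):
--                 j += 1
--             blocks.append([i, j - 1])
--             i = j
--         else:
--             i += 1
--     return blocks
-- ===== Notes on version B (the rewrite author's own statement) =====
-- stated objective: alternative
-- what changed: Replaces the delimiter-flag state machine that appends [i,i] and keeps mutating blocks[-1][1] with a two-pointer run scan: at each non-blank line it advances a second index over the whole run and emits the finished block [i, j-1] once, never revisiting or mutating blocks.
import Mathlib
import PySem

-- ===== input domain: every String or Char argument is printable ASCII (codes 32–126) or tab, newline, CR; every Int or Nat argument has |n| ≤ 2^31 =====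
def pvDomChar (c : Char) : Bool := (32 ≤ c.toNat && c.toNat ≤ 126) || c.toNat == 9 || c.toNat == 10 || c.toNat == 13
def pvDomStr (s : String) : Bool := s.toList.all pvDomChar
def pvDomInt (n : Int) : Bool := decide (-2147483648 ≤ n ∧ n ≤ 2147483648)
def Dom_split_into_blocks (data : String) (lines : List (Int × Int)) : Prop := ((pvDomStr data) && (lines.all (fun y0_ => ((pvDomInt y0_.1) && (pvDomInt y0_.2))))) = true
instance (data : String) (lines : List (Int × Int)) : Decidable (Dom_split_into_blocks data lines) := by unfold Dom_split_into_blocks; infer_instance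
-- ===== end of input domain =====

-- B replaces A's delimiter-flag state machine (append [i,i], then mutate blocks[-1][1])
-- with a two-pointer run scan emitting each finished block once; alternative, same cost.

-- ===== PORT A =====
-- blocks[-1][1] = i  (update index 1 of the last block)
def pvSetLast1 (blocks : List (List Int)) (i : Int) : List (List Int) :=
  match blocks with
  | [] => []
  | [blk] => [blk.set 1 i]
  | b :: bs => b :: pvSetLast1 bs i

def aLoop (data : String) (i : Int) (rest : List (Int × Int))
    (blocks : List (List Int)) (delimiter : Bool) : List (List Int) :=
  match rest with
  | [] => blocks
  | (head, tail) :: rs =>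
    let l := PySem.Str.strip (PySem.Str.slice data (some head) (some tail))
    if PySem.Str.len l == 0 then
      aLoop data (i + 1) rs blocks true
    else
      if delimiter then
        aLoop data (i + 1) rs (blocks ++ [[i, i]]) false
      else
        aLoop data (i + 1) rs (pvSetLast1 blocks i) delimiter

def split_into_blocks (data : String) (lines : List (Int × Int)) : List (List Int) :=
  aLoop data 0 lines [] true

-- ===== PORT B =====
def bNonblank (data : String) (p : Int × Int) : Bool :=
  PySem.Str.len (PySem.Str.strip (PySem.Str.slice data (some p.1) (some p.2))) != 0

-- two-pointer scan: on a non-blank line, advance over the whole non-blank run, emit one block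
-- (fuel = length of the remaining list; purely a structural-termination bound)
def bGo (data : String) : Nat → Int → List (Int × Int) → List (List Int)
  | 0, _, _ => []
  | _ + 1, _, [] => []
  | f + 1, i, p :: rs =>
    if bNonblank data p then
      let grp := rs.takeWhile (bNonblank data)
      [i, i + grp.length] :: bGo data f (i + 1 + grp.length) (rs.dropWhile (bNonblank data))
    else
      bGo data f (i + 1) rs

def split_into_blocks_alt (data : String) (lines : List (Int × Int)) : List (List Int) :=
  bGo data lines.length 0 lines

-- ===== PRECONDITION & SPEC =====
def Spec_split_into_blocks (data : String) (lines : List (Int × Int)) (out : List (List Int)) : Prop := out = split_into_blocks_alt data lines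
instance (data : String) (lines : List (Int × Int)) (out : List (List Int)) : Decidable (Spec_split_into_blocks data lines out) := by unfold Spec_split_into_blocks; infer_instance

-- ===== CLAIM (what is proved, stated in full; the proofs are below) =====
def Claim_equal_split_into_blocks : Prop := ∀ (data : String) (lines : List (Int × Int)), Dom_split_into_blocks data lines → Spec_split_into_blocks data lines (split_into_blocks data lines)

-- ===== LEMMAS AND PROOFS =====

theorem pvSetLast1_append (bs : List (List Int)) (a b i : Int) :
    pvSetLast1 (bs ++ [[a, b]]) i = bs ++ [[a, i]] := by
  induction bs with
  | nil => rfl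
  | cons x xs ih =>
    cases xs with
    | nil => simp [pvSetLast1]
    | cons y ys => simpa [pvSetLast1] using ih

-- the fuel is irrelevant as long as it covers the list
theorem bGo_fuel (data : String) (f : Nat) : ∀ (g : Nat) (i : Int) (rest : List (Int × Int)),
    rest.length ≤ f → rest.length ≤ g → bGo data f i rest = bGo data g i rest := by
  induction f with
  | zero =>
    intro g i rest hf _
    have : rest = [] := List.eq_nil_of_length_eq_zero (Nat.le_zero.mp hf)
    subst this; cases g <;> rfl
  | succ f ihf =>
    intro g i rest hf hg
    cases rest with
    | nil => cases g <;> rfl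
    | cons p rs =>
      cases g with
      | zero => simp at hg
      | succ g =>
        simp only [List.length_cons, Nat.succ_le_succ_iff] at hf hg
        simp only [bGo]
        by_cases hc : bNonblank data p = true
        · simp only [hc, if_true]
          have hd : (rs.dropWhile (bNonblank data)).length ≤ rs.length :=
            (List.dropWhile_sublist (p := bNonblank data)).length_le
          rw [ihf g _ _ (le_trans hd hf) (le_trans hd hg)]
        · simp only [hc, Bool.false_eq_true, if_false]
          exact ihf g _ _ hf hg

-- the invariant tying A's state machine to B's run scan
theorem aLoop_eq_bGo (data : String) (rest : List (Int × Int)) :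
    (∀ i blocks, aLoop data i rest blocks true = blocks ++ bGo data rest.length i rest) ∧
    (∀ i bs a b, aLoop data i rest (bs ++ [[a, b]]) false =
      bs ++ [[a, if (rest.takeWhile (bNonblank data)).length = 0 then b
                 else i + (rest.takeWhile (bNonblank data)).length - 1]] ++
        bGo data (rest.dropWhile (bNonblank data)).length
          (i + (rest.takeWhile (bNonblank data)).length)
          (rest.dropWhile (bNonblank data))) := by
  induction rest with
  | nil => constructor <;> intros <;> simp [aLoop, bGo]
  | cons p rs ih =>
    obtain ⟨p1, p2⟩ := p
    by_cases hx : (PySem.Str.len (PySem.Str.strip (PySem.Str.slice data (some p1) (some p2))) == 0) = true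
    · -- blank line
      have hnb : bNonblank data (p1, p2) = false := by
        simp only [bNonblank, bne, hx, Bool.not_true]
      constructor
      · intro i blocks
        simp only [aLoop, hx, if_true, List.length_cons, bGo, hnb, Bool.false_eq_true, if_false]
        exact ih.1 (i + 1) blocks
      · intro i bs a b
        have h1 := ih.1 (i + 1) (bs ++ [[a, b]])
        simp only [aLoop, hx, if_true, h1, List.takeWhile_cons, List.dropWhile_cons, hnb,
          Bool.false_eq_true, if_false, List.length_nil, List.length_cons, if_pos rfl,
          Nat.cast_zero, add_zero, bGo, List.append_assoc]
    · -- non-blank line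
      have hnb : bNonblank data (p1, p2) = true := by
        simp only [bNonblank, bne, hx, Bool.not_false]
      have hlen : ∀ (i : Int), (if (rs.takeWhile (bNonblank data)).length = 0 then i
            else i + 1 + ((rs.takeWhile (bNonblank data)).length : Int) - 1)
          = i + ((rs.takeWhile (bNonblank data)).length : Int) := by
        intro i; split_ifs with h0 <;> omega
      have hd : (rs.dropWhile (bNonblank data)).length ≤ rs.length :=
        (List.dropWhile_sublist (p := bNonblank data)).length_le
      constructor
      · intro i blocks
        have h2 := ih.2 (i + 1) blocks i i
        have hf := bGo_fuel data rs.length (rs.dropWhile (bNonblank data)).length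
          (i + 1 + ((rs.takeWhile (bNonblank data)).length : Int))
          (rs.dropWhile (bNonblank data)) hd le_rfl
        simp only [aLoop, hx, Bool.false_eq_true, if_false, if_pos rfl, h2, List.length_cons,
          bGo, hnb, if_true, hf, hlen i, List.append_assoc, List.singleton_append]
      · intro i bs a b
        have h2 := ih.2 (i + 1) bs a i
        simp only [aLoop, hx, Bool.false_eq_true, if_false, pvSetLast1_append, h2,
          List.takeWhile_cons, List.dropWhile_cons, hnb, if_true, List.length_cons,
          Nat.cast_add, Nat.cast_one, if_neg (Nat.succ_ne_zero _), hlen i]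
        have hidx : i + (((rs.takeWhile (bNonblank data)).length : Int) + 1)
            = i + 1 + ((rs.takeWhile (bNonblank data)).length : Int) := by omega
        have hend : i + (((rs.takeWhile (bNonblank data)).length : Int) + 1) - 1
            = i + ((rs.takeWhile (bNonblank data)).length : Int) := by omega
        rw [hend, hidx]

-- ===== VERDICT (by name: the statement is the Claim_ definition above) =====
theorem split_into_blocks_spec : Claim_equal_split_into_blocks := by
  intro data lines _
  unfold Spec_split_into_blocks split_into_blocks split_into_blocks_alt
  simpa using (aLoop_eq_bGo data lines).1 0 []
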